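-- pv_equiv track=rewrite | github.com/Kris465/MemoryBox | old_projects/for_check/block6/main23.py | analyze_number
-- ===== SOURCE A (Python) =====
-- def analyze_number(n, a, z, x, y):
--     # Преобразуем число в строку для удобной работы с цифрами
--     digits = str(n)
--
--     # а) Количество цифр a
--     count_a = sum(1 for digit in digits if digit == str(a))
--
--     # б) Количество цифр, кратных z
--     count_multiple_z = sum(1 for digit in digits if int(digit) % z == 0)
--
--     # в) Сумма цифр, больших a
--     sum_greater_a = sum(int(digit) for digit in digits if int(digit) > a)
--
--     # г) Количество цифр x и y
--     count_x_y = sum(1 for digit in digits if digit in (str(x), str(y)))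
--
--     return {
--         'количество_цифр_a': count_a,
--         'количество_цифр_кратных_z': count_multiple_z,
--         'сумма_цифр_больше_a': sum_greater_a,
--         'количество_цифр_x_и_y': count_x_y
--     }
-- ===== SOURCE B (Python) =====
-- def analyze_number(n, a, z, x, y):
--     # Arithmetic digit extraction: peel digits off |n| with divmod in one pass,
--     # no string conversion at all (digit char == str(k) iff digit value == k).
--     count_a = count_mz = total_gt = count_xy = 0
--     m = abs(n)
--     while True:
--         m, d = divmod(m, 10)
--         if d == a:
--             count_a += 1
--         if d % z == 0:
--             count_mz += 1
--         if d > a: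
--             total_gt += d
--         if d == x or d == y:
--             count_xy += 1
--         if m == 0:
--             break
--     return {
--         'количество_цифр_a': count_a,
--         'количество_цифр_кратных_z': count_mz,
--         'сумма_цифр_больше_a': total_gt,
--         'количество_цифр_x_и_y': count_xy
--     }
-- ===== Notes on version B (the rewrite author's own statement) =====
-- stated objective: alternative
-- what changed: B never builds str(n): it peels the digits off |n| arithmetically with divmod in a single loop that updates all four statistics at once, replacing A's string conversion plus four separate generator passes; digit-char comparisons become integer comparisons (digit char equals str(k) iff the digit value equals k).
import Mathlib
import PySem

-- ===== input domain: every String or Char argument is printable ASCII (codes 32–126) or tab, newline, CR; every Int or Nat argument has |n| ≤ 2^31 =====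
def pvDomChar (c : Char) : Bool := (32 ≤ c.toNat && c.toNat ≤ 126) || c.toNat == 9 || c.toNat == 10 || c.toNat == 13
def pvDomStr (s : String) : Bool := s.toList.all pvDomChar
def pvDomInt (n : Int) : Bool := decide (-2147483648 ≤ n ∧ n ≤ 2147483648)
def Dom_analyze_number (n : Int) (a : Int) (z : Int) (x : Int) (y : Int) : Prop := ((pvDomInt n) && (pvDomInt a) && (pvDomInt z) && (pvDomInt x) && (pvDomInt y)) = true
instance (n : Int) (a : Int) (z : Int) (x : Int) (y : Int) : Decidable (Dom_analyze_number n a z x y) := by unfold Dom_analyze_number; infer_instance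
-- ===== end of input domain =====

-- B replaces A's str(n) conversion plus four separate digit scans by one arithmetic
-- divmod loop over |n| updating all four statistics at once (alternative, not timed faster).


-- ===== PORT A =====
-- int(digit) for a one-character string (total form; Pre_ keeps n ≥ 0, so every
-- digit of str(n) is a decimal digit and ofStr? is exact there)
def pvDigitInt (s : String) : Int := (PySem.Int.ofStr? s).getD 0

def analyze_number (n : Int) (a : Int) (z : Int) (x : Int) (y : Int) : List (String × Int) :=
  -- digits = str(n), iterated as the list of its one-character strings
  let digits : List String := (PySem.Int.toChars n).map (fun c => String.ofList [c])
  let count_a : Int := digits.foldl (fun s d => if d = PySem.Int.toStr a then s + 1 else s) 0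
  let count_multiple_z : Int :=
    digits.foldl (fun s d => if PySem.Int.mod (pvDigitInt d) z = 0 then s + 1 else s) 0
  let sum_greater_a : Int :=
    digits.foldl (fun s d => if pvDigitInt d > a then s + pvDigitInt d else s) 0
  let count_x_y : Int :=
    digits.foldl (fun s d => if d = PySem.Int.toStr x ∨ d = PySem.Int.toStr y then s + 1 else s) 0
  [("количество_цифр_a", count_a),
   ("количество_цифр_кратных_z", count_multiple_z),
   ("сумма_цифр_больше_a", sum_greater_a),
   ("количество_цифр_x_и_y", count_x_y)]

-- ===== PORT B =====
-- while True: m, d = divmod(m, 10); update the four accumulators; if m == 0: break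
-- (m = abs(n) stays ≥ 0 throughout, so it is carried as a Nat; Python's divmod(m, 10)
-- on m ≥ 0 is exactly Nat division/remainder)
def pvLoopB (m : Nat) (a z x y : Int) (ca cz sg cxy : Int) : Int × Int × Int × Int :=
  let d : Int := (m % 10 : Nat)
  let m' : Nat := m / 10
  let ca' := if d = a then ca + 1 else ca
  let cz' := if PySem.Int.mod d z = 0 then cz + 1 else cz
  let sg' := if d > a then sg + d else sg
  let cxy' := if d = x ∨ d = y then cxy + 1 else cxy
  if h : m' = 0 then (ca', cz', sg', cxy')
  else pvLoopB m' a z x y ca' cz' sg' cxy'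
termination_by m
decreasing_by omega

def analyze_number_alt (n : Int) (a : Int) (z : Int) (x : Int) (y : Int) : List (String × Int) :=
  let r := pvLoopB n.natAbs a z x y 0 0 0 0
  [("количество_цифр_a", r.1),
   ("количество_цифр_кратных_z", r.2.1),
   ("сумма_цифр_больше_a", r.2.2.1),
   ("количество_цифр_x_и_y", r.2.2.2)]

-- ===== PRECONDITION & SPEC =====
-- Pre_ excludes exactly the inputs on which Python A raises: n < 0 (str(n) contains '-',
-- so int(digit) raises ValueError) and z = 0 (int(digit) % z raises ZeroDivisionError).
def Pre_analyze_number (n : Int) (a : Int) (z : Int) (x : Int) (y : Int) : Prop := 0 ≤ n ∧ z ≠ 0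
instance (n : Int) (a : Int) (z : Int) (x : Int) (y : Int) : Decidable (Pre_analyze_number n a z x y) := by unfold Pre_analyze_number; infer_instance
def pvWitness_analyze_number : Int × Int × Int × Int × Int := (1223, 2, 3, 1, 2)
def Spec_analyze_number (n : Int) (a : Int) (z : Int) (x : Int) (y : Int) (out : List (String × Int)) : Prop := out = analyze_number_alt n a z x y
instance (n : Int) (a : Int) (z : Int) (x : Int) (y : Int) (out : List (String × Int)) : Decidable (Spec_analyze_number n a z x y out) := by unfold Spec_analyze_number; infer_instance

-- ===== CLAIM (what is proved, stated in full; the proofs are below) =====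
def Claim_equal_analyze_number : Prop := ∀ (n : Int) (a : Int) (z : Int) (x : Int) (y : Int), Dom_analyze_number n a z x y → Pre_analyze_number n a z x y → Spec_analyze_number n a z x y (analyze_number n a z x y)

-- ===== LEMMAS AND PROOFS =====

-- Big-endian decimal digits of a natural number (always non-empty).
def pvDigE (m : Nat) : List Nat :=
  if h : m < 10 then [m] else pvDigE (m / 10) ++ [m % 10]
termination_by m
decreasing_by omega

theorem pvDigE_small (m : Nat) (h : m < 10) : pvDigE m = [m] := by
  rw [pvDigE]; simp [h]

theorem pvDigE_big (m : Nat) (h : ¬ m < 10) : pvDigE m = pvDigE (m / 10) ++ [m % 10] := by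
  rw [pvDigE]; simp [h]

theorem pvDigE_ne_nil (m : Nat) : pvDigE m ≠ [] := by
  by_cases h : m < 10
  · rw [pvDigE_small m h]; simp
  · rw [pvDigE_big m h]; simp

theorem pvDigE_mem_lt (m : Nat) : ∀ e ∈ pvDigE m, e < 10 := by
  induction m using Nat.strong_induction_on with
  | _ m ih =>
    by_cases h : m < 10
    · rw [pvDigE_small m h]; intro e he; simp at he; omega
    · rw [pvDigE_big m h]
      intro e he
      rcases List.mem_append.mp he with h1 | h1
      · exact ih (m / 10) (Nat.div_lt_self (by omega) (by omega)) e h1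
      · simp at h1; omega

-- Nat.toDigits 10 m is exactly the big-endian digit list rendered with digitChar.
theorem pvToDigitsCore_eq (f : Nat) : ∀ (m : Nat) (ds : List Char), m < f →
    Nat.toDigitsCore 10 f m ds = (pvDigE m).map Nat.digitChar ++ ds := by
  induction f with
  | zero => intro m ds h; omega
  | succ f ih =>
    intro m ds h
    by_cases h10 : m / 10 = 0
    · have hm : m < 10 := by omega
      rw [Nat.toDigitsCore]
      simp [h10, pvDigE_small m hm, Nat.mod_eq_of_lt hm]
    · have hm : ¬ m < 10 := by
        intro hc; exact h10 (Nat.div_eq_of_lt hc)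
      rw [Nat.toDigitsCore]
      simp only [h10, if_false]
      rw [ih (m / 10) _ (by omega), pvDigE_big m hm]
      simp

theorem pvToDigits_eq (m : Nat) : Nat.toDigits 10 m = (pvDigE m).map Nat.digitChar := by
  rw [Nat.toDigits, pvToDigitsCore_eq (m + 1) m [] (by omega)]
  simp

theorem pvDigitChar_inj (d e : Nat) (hd : d < 10) (he : e < 10) :
    Nat.digitChar d = Nat.digitChar e ↔ d = e := by
  interval_cases d <;> interval_cases e <;> simp [Nat.digitChar]

theorem pvDigitInt_digitChar (e : Nat) (he : e < 10) :
    pvDigitInt (String.ofList [Nat.digitChar e]) = (e : Int) := by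
  interval_cases e <;> decide

-- digit char = str(a)  ↔  digit value = a
theorem pvStr_eq_toStr (e : Nat) (he : e < 10) (a : Int) :
    (String.ofList [Nat.digitChar e] = PySem.Int.toStr a) ↔ ((e : Int) = a) := by
  have hlist : String.ofList [Nat.digitChar e] = PySem.Int.toStr a ↔
      [Nat.digitChar e] = PySem.Int.toChars a := by
    constructor
    · intro h
      have := congrArg String.toList h
      simpa [PySem.Int.toList_toStr] using this
    · intro h
      apply String.ext
      simpa [PySem.Int.toList_toStr] using h
  rw [hlist]
  unfold PySem.Int.toChars
  by_cases ha : a < 0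
  · simp only [ha, if_true]
    constructor
    · intro h
      have h1 : Nat.digitChar e = '-' := by
        have := congrArg List.head? h
        simpa using this
      exfalso; revert h1; interval_cases e <;> simp [Nat.digitChar]
    · intro h; exfalso; omega
  · simp only [ha, if_false]
    rw [pvToDigits_eq]
    by_cases hsm : a.toNat < 10
    · rw [pvDigE_small _ hsm]
      simp only [List.map_cons, List.map_nil, List.cons.injEq, and_true]
      rw [pvDigitChar_inj e a.toNat he hsm]
      omega
    · rw [pvDigE_big _ hsm]
      constructor
      · intro h
        exfalso
        have hl := congrArg List.length h
        simp only [List.length_map, List.length_append, List.length_cons,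
          List.length_nil] at hl
        have hne : (pvDigE (a.toNat / 10)).length ≠ 0 :=
          fun h0 => pvDigE_ne_nil _ (List.length_eq_zero_iff.mp h0)
        omega
      · intro h; exfalso; omega

-- the four per-digit contributions
def pvF1 (a : Int) (e : Nat) : Int := if (e : Int) = a then 1 else 0
def pvF2 (z : Int) (e : Nat) : Int := if PySem.Int.mod (e : Int) z = 0 then 1 else 0
def pvF3 (a : Int) (e : Nat) : Int := if (e : Int) > a then (e : Int) else 0
def pvF4 (x y : Int) (e : Nat) : Int := if (e : Int) = x ∨ (e : Int) = y then 1 else 0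

theorem pvFoldl_ite_add {α : Type} (P : α → Prop) [DecidablePred P] (g : α → Int)
    (L : List α) (init : Int) :
    L.foldl (fun s c => if P c then s + g c else s) init
      = init + (L.map (fun c => if P c then g c else 0)).sum := by
  induction L generalizing init with
  | nil => simp
  | cons c tl ih => simp only [List.foldl_cons, List.map_cons, List.sum_cons, ih]; split_ifs <;> ring

-- B's loop computes the four digit sums over pvDigE m (processed little-endian).
theorem pvLoopB_eq (m : Nat) (a z x y ca cz sg cxy : Int) :
    pvLoopB m a z x y ca cz sg cxy =
      (ca + ((pvDigE m).map (pvF1 a)).sum,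
       cz + ((pvDigE m).map (pvF2 z)).sum,
       sg + ((pvDigE m).map (pvF3 a)).sum,
       cxy + ((pvDigE m).map (pvF4 x y)).sum) := by
  induction m using Nat.strong_induction_on generalizing ca cz sg cxy with
  | _ m ih =>
    rw [pvLoopB]
    by_cases h : m / 10 = 0
    · have hm : m < 10 := by omega
      simp only [h, dif_pos]
      rw [pvDigE_small m hm]
      simp only [List.map_cons, List.map_nil, List.sum_cons, List.sum_nil, add_zero,
        Nat.mod_eq_of_lt hm, pvF1, pvF2, pvF3, pvF4]
      refine Prod.ext ?_ (Prod.ext ?_ (Prod.ext ?_ ?_)) <;> simp <;> split_ifs <;> ring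
    · have hm : ¬ m < 10 := fun hc => h (Nat.div_eq_of_lt hc)
      simp only [h, dif_neg, not_false_iff]
      rw [ih (m / 10) (Nat.div_lt_self (by omega) (by omega)), pvDigE_big m hm]
      simp only [List.map_append, List.sum_append, List.map_cons, List.map_nil,
        List.sum_cons, List.sum_nil, add_zero, pvF1, pvF2, pvF3, pvF4]
      refine Prod.ext ?_ (Prod.ext ?_ (Prod.ext ?_ ?_)) <;> simp <;> split_ifs <;> ring

-- ===== VERDICT =====
theorem analyze_number_spec : Claim_equal_analyze_number := by
  intro n a z x y _ hpre
  obtain ⟨hn, hz⟩ := hpre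
  unfold Spec_analyze_number analyze_number analyze_number_alt
  have hneg : ¬ n < 0 := by omega
  have hchars : PySem.Int.toChars n = (pvDigE n.natAbs).map Nat.digitChar := by
    unfold PySem.Int.toChars
    rw [if_neg hneg, pvToDigits_eq, show n.toNat = n.natAbs from by omega]
  rw [hchars, pvLoopB_eq]
  simp only [List.map_map, List.cons.injEq, Prod.mk.injEq, true_and, and_true, zero_add]
  have hmem : ∀ e ∈ pvDigE n.natAbs, e < 10 := pvDigE_mem_lt n.natAbs
  refine ⟨?_, ?_, ?_, ?_⟩
  · rw [pvFoldl_ite_add (fun s => s = PySem.Int.toStr a) (fun _ => (1 : Int)), zero_add]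
    rw [List.map_map]
    congr 1
    apply List.map_congr_left
    intro e he
    simp only [Function.comp, pvF1, pvStr_eq_toStr e (hmem e he) a]
  · rw [pvFoldl_ite_add (fun s => PySem.Int.mod (pvDigitInt s) z = 0) (fun _ => (1 : Int)), zero_add]
    rw [List.map_map]
    congr 1
    apply List.map_congr_left
    intro e he
    simp only [Function.comp, pvF2, pvDigitInt_digitChar e (hmem e he)]
  · rw [pvFoldl_ite_add (fun s => pvDigitInt s > a) pvDigitInt, zero_add]
    rw [List.map_map]
    congr 1
    apply List.map_congr_left
    intro e he
    simp only [Function.comp, pvF3, pvDigitInt_digitChar e (hmem e he)]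
  · rw [pvFoldl_ite_add (fun s => s = PySem.Int.toStr x ∨ s = PySem.Int.toStr y) (fun _ => (1 : Int)), zero_add]
    rw [List.map_map]
    congr 1
    apply List.map_congr_left
    intro e he
    simp only [Function.comp, pvF4, pvStr_eq_toStr e (hmem e he) x, pvStr_eq_toStr e (hmem e he) y]
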